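-- pv_equiv track=rewrite | github.com/uc-cdis/requestor | src/requestor/arborist.py | is_path_prefix_of_path
-- ===== SOURCE A (Python) =====
-- def is_path_prefix_of_path(resource_prefix: str, resource_path: str) -> bool:
--     """
--     Return True if the arborist resource path "resource_prefix" is a
--     prefix of the arborist resource path "resource_path".
--     """
--     prefix_list = resource_prefix.rstrip("/").split("/")
--     path_list = resource_path.rstrip("/").split("/")
--     if len(prefix_list) > len(path_list):
--         return False
--     for i, prefix_item in enumerate(prefix_list):
--         if path_list[i] != prefix_item:
--             return False
--     return True
-- ===== SOURCE B (Python) =====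
-- def is_path_prefix_of_path(resource_prefix: str, resource_path: str) -> bool:
--     """
--     Return True if the arborist resource path "resource_prefix" is a
--     prefix of the arborist resource path "resource_path".
--     """
--     p = resource_prefix.rstrip("/")
--     q = resource_path.rstrip("/")
--     return q == p or q.startswith(p + "/")
-- ===== Notes on version B (the rewrite author's own statement) =====
-- stated objective: simpler
-- what changed: Replaced the split-into-components list and the indexed comparison loop by a single string test: q == p or q.startswith(p + '/'), where the appended '/' enforces the same component-boundary semantics.
import Mathlib
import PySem

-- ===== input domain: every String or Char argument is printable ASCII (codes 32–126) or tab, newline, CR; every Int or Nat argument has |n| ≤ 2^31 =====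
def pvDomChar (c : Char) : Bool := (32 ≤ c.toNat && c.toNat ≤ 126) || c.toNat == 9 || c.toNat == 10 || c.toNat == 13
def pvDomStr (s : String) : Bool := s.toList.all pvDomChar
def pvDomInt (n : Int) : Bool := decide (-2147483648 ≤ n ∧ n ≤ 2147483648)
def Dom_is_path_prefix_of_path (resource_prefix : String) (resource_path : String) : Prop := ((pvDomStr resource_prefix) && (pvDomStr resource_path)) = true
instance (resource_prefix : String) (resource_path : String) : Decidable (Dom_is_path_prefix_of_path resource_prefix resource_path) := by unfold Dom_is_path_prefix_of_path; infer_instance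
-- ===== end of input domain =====

-- B replaces A's split-into-components list and indexed comparison loop by a single
-- string test (q == p or q.startswith(p + "/")); objective: simpler, same behaviour.


-- shared helper: Python's s.rstrip("/") on char lists (exact: removes exactly the trailing '/' characters)
def rstripSlash (cs : List Char) : List Char := ((cs.reverse.dropWhile (fun c => c == '/')).reverse)

-- ===== PORT A =====
-- the 'for i, prefix_item in enumerate(prefix_list)' loop, with path_list[i] via pyGet?
def pvLoopA : List (Int × List Char) → List (List Char) → Bool
  | [], _ => true
  | (i, item) :: rest, path_list =>
    match PySem.List.pyGet? path_list i with
    | some x => if x ≠ item then false else pvLoopA rest path_list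
    | none => false  -- IndexError; unreachable under the length guard

def is_path_prefix_of_path (resource_prefix : String) (resource_path : String) : Bool :=
  let prefix_list := PySem.Chars.splitOn (rstripSlash resource_prefix.toList) ['/']
  let path_list := PySem.Chars.splitOn (rstripSlash resource_path.toList) ['/']
  if prefix_list.length > path_list.length then false
  else pvLoopA (PySem.List.enumerate prefix_list) path_list

-- ===== PORT B =====
def is_path_prefix_of_path_alt (resource_prefix : String) (resource_path : String) : Bool :=
  let p := rstripSlash resource_prefix.toList
  let q := rstripSlash resource_path.toList
  q == p || PySem.Chars.startswith q (p ++ ['/'])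

-- ===== PRECONDITION & SPEC =====
def Spec_is_path_prefix_of_path (resource_prefix : String) (resource_path : String) (out : Bool) : Prop := out = is_path_prefix_of_path_alt resource_prefix resource_path
instance (resource_prefix : String) (resource_path : String) (out : Bool) : Decidable (Spec_is_path_prefix_of_path resource_prefix resource_path out) := by unfold Spec_is_path_prefix_of_path; infer_instance

-- ===== CLAIM (what is proved, stated in full; the proofs are below) =====
def Claim_equal_is_path_prefix_of_path : Prop := ∀ (resource_prefix : String) (resource_path : String), Dom_is_path_prefix_of_path resource_prefix resource_path → Spec_is_path_prefix_of_path resource_prefix resource_path (is_path_prefix_of_path resource_prefix resource_path)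

-- ===== LEMMAS AND PROOFS =====

-- structural characterization of splitting on '/'
def pvSplit1 : List Char → List (List Char)
  | [] => [[]]
  | c :: rest => if c = '/' then [] :: pvSplit1 rest else (pvSplit1 rest).modifyHead (c :: ·)

theorem pvSplit1_cons_shape (cs : List Char) : ∃ h t, pvSplit1 cs = h :: t := by
  induction cs with
  | nil => exact ⟨[], [], rfl⟩
  | cons c rest ih =>
    obtain ⟨h, t, e⟩ := ih
    by_cases hc : c = '/'
    · exact ⟨[], pvSplit1 rest, by simp [pvSplit1, hc]⟩
    · exact ⟨c :: h, t, by simp [pvSplit1, hc, e]⟩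

theorem pvGo_eq (l : List Char) : ∀ (fuel : Nat) (cur : List Char) (acc : List (List Char)),
    l.length ≤ fuel →
    PySem.Chars.splitOn.go ['/'] fuel l cur acc
      = acc.reverse ++ (pvSplit1 l).modifyHead (cur.reverse ++ ·) := by
  induction l with
  | nil =>
    intro fuel cur acc _
    cases fuel <;> simp [PySem.Chars.splitOn.go, pvSplit1]
  | cons c rest ih =>
    intro fuel cur acc hf
    cases fuel with
    | zero => simp at hf
    | succ f =>
      by_cases hc : c = '/'
      · have hp : List.isPrefixOf ['/'] (c :: rest) = true := by
          simp [List.isPrefixOf, hc]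
        have hgo : PySem.Chars.splitOn.go ['/'] (f + 1) (c :: rest) cur acc
            = PySem.Chars.splitOn.go ['/'] f rest [] (cur.reverse :: acc) := by
          simp [PySem.Chars.splitOn.go, hp]
        rw [hgo, ih f [] (cur.reverse :: acc) (by simpa using Nat.le_of_succ_le_succ hf)]
        obtain ⟨h, t, e⟩ := pvSplit1_cons_shape rest
        simp [pvSplit1, hc, e]
      · have hp : List.isPrefixOf ['/'] (c :: rest) = false := by
          simp [List.isPrefixOf]
          exact fun h => (hc h.symm).elim
        have hgo : PySem.Chars.splitOn.go ['/'] (f + 1) (c :: rest) cur acc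
            = PySem.Chars.splitOn.go ['/'] f rest (c :: cur) acc := by
          simp [PySem.Chars.splitOn.go, hp]
        rw [hgo, ih f (c :: cur) acc (by simpa using Nat.le_of_succ_le_succ hf)]
        obtain ⟨h, t, e⟩ := pvSplit1_cons_shape rest
        simp [pvSplit1, hc, e]
  
theorem splitOn_eq_pvSplit1 (l : List Char) : PySem.Chars.splitOn l ['/'] = pvSplit1 l := by
  rw [PySem.Chars.splitOn, pvGo_eq l (l.length + 1) [] [] (Nat.le_succ _)]
  obtain ⟨h, t, e⟩ := pvSplit1_cons_shape l
  simp [e]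

theorem consIsPrefixOf (a b : List Char) (as bs : List (List Char)) :
    (a :: as).isPrefixOf (b :: bs) = (a == b && as.isPrefixOf bs) := rfl

theorem pvLoopA_eq (pl : List (List Char)) : ∀ (ql : List (List Char)) (n : Nat),
    pvLoopA (PySem.List.enumerate pl (n : Int)) ql = pl.isPrefixOf (ql.drop n) := by
  induction pl with
  | nil => intro ql n; simp [PySem.List.enumerate, pvLoopA, List.isPrefixOf]
  | cons x xs ih =>
    intro ql n
    rw [PySem.List.enumerate]
    cases hq : ql[n]? with
    | none =>
      have hlen : ql.length ≤ n := List.getElem?_eq_none_iff.mp hq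
      rw [List.drop_of_length_le hlen]
      simp [pvLoopA, PySem.List.pyGet?_natCast, hq, List.isPrefixOf]
    | some y =>
      obtain ⟨hn, hy⟩ : ∃ h : n < ql.length, ql[n] = y := by
        simpa [List.getElem?_eq_some_iff] using hq
      have hdrop : ql.drop n = y :: ql.drop (n + 1) := by
        rw [List.drop_eq_getElem_cons hn, hy]
      rw [hdrop]
      have hcast : (n : Int) + 1 = ((n + 1 : Nat) : Int) := by push_cast; ring
      simp only [pvLoopA, PySem.List.pyGet?_natCast, hq, hcast, ih, consIsPrefixOf]
      by_cases hxy : y = x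
      · simp [hxy]
      · have hne : (x == y) = false := beq_eq_false_iff_ne.mpr (Ne.symm hxy)
        simp [hxy, hne]

theorem isPrefixOf_length_le {α : Type} [BEq α] [LawfulBEq α] {l m : List α}
    (h : l.isPrefixOf m = true) : l.length ≤ m.length :=
  (List.isPrefixOf_iff_prefix.mp h).length_le

theorem portA_eq (rp rq : String) :
    is_path_prefix_of_path rp rq
      = (pvSplit1 (rstripSlash rp.toList)).isPrefixOf (pvSplit1 (rstripSlash rq.toList)) := by
  unfold is_path_prefix_of_path
  simp only [splitOn_eq_pvSplit1]
  by_cases hlen : (pvSplit1 (rstripSlash rp.toList)).length > (pvSplit1 (rstripSlash rq.toList)).length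
  · rw [if_pos hlen]
    cases hres : (pvSplit1 (rstripSlash rp.toList)).isPrefixOf (pvSplit1 (rstripSlash rq.toList))
    · rfl
    · exact absurd (isPrefixOf_length_le hres) (by omega)
  · rw [if_neg hlen]
    have := pvLoopA_eq (pvSplit1 (rstripSlash rp.toList)) (pvSplit1 (rstripSlash rq.toList)) 0
    simpa using this

-- the heart: component-list prefix ⟷ direct string test
theorem pvSplit1_prefix_iff (p : List Char) : ∀ (q : List Char),
    (pvSplit1 p <+: pvSplit1 q) ↔ (q = p ∨ (p ++ ['/']) <+: q) := by
  induction p with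
  | nil =>
    intro q
    cases q with
    | nil => simp [pvSplit1]
    | cons c q' =>
      by_cases hc : c = '/'
      · simp [pvSplit1, hc, List.cons_prefix_cons]
      · obtain ⟨h, t, e⟩ := pvSplit1_cons_shape q'
        simp [pvSplit1, hc, e, List.cons_prefix_cons, Ne.symm hc]
  | cons c p' ih =>
    intro q
    by_cases hc : c = '/'
    · subst hc
      cases q with
      | nil =>
        obtain ⟨h, t, e⟩ := pvSplit1_cons_shape p'
        simp [pvSplit1, e]
      | cons c' q' =>
        by_cases hc' : c' = '/'
        · subst hc'
          simp [pvSplit1, List.cons_prefix_cons, ih q']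
        · obtain ⟨h, t, e⟩ := pvSplit1_cons_shape q'
          simp [pvSplit1, hc', e, List.cons_prefix_cons, Ne.symm hc']
    · obtain ⟨p0, pt, ep⟩ := pvSplit1_cons_shape p'
      cases q with
      | nil =>
        simp [pvSplit1, hc, ep]
      | cons c' q' =>
        by_cases hc' : c' = '/'
        · subst hc'
          have rhs : pvSplit1 ('/' :: q') = [] :: pvSplit1 q' := by simp [pvSplit1]
          have lhs : pvSplit1 (c :: p') = (c :: p0) :: pt := by simp [pvSplit1, hc, ep]
          rw [lhs, rhs]
          constructor
          · intro hpre
            rw [List.cons_prefix_cons] at hpre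
            exact absurd hpre.1 (by simp)
          · rintro (heq | hpre)
            · exact absurd (List.cons.inj heq).1 (fun h => hc h.symm)
            · rw [List.cons_append, List.cons_prefix_cons] at hpre
              exact absurd hpre.1 hc
        · obtain ⟨q0, qt, eq⟩ := pvSplit1_cons_shape q'
          have hih := ih q'
          rw [ep, eq] at hih
          have lhs : pvSplit1 (c :: p') = (c :: p0) :: pt := by
            simp [pvSplit1, hc, ep]
          have rhs : pvSplit1 (c' :: q') = (c' :: q0) :: qt := by
            simp [pvSplit1, hc', eq]
          rw [lhs, rhs]
          constructor
          · intro hpre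
            rw [List.cons_prefix_cons] at hpre
            obtain ⟨hhead, ht⟩ := hpre
            obtain ⟨hcc, h0⟩ := List.cons.inj hhead
            cases hih.mp (List.cons_prefix_cons.mpr ⟨h0, ht⟩) with
            | inl h => exact Or.inl (by rw [h, ← hcc])
            | inr h =>
              exact Or.inr (by rw [List.cons_append, List.cons_prefix_cons]; exact ⟨hcc, h⟩)
          · rintro (heq | hpre)
            · obtain ⟨hcc, hq⟩ := List.cons.inj heq
              subst hq
              have := hih.mpr (Or.inl rfl)
              rw [List.cons_prefix_cons] at this ⊢
              exact ⟨by rw [hcc, this.1], this.2⟩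
            · rw [List.cons_append, List.cons_prefix_cons] at hpre
              obtain ⟨hcc, h⟩ := hpre
              have := hih.mpr (Or.inr h)
              rw [List.cons_prefix_cons] at this ⊢
              exact ⟨by rw [hcc, this.1], this.2⟩

-- ===== VERDICT (by name: the statement is the Claim_ definition above) =====
theorem is_path_prefix_of_path_spec : Claim_equal_is_path_prefix_of_path := by
  intro rp rq _
  unfold Spec_is_path_prefix_of_path
  rw [portA_eq]
  unfold is_path_prefix_of_path_alt
  rw [Bool.eq_iff_iff]
  simp only [List.isPrefixOf_iff_prefix, Bool.or_eq_true, beq_iff_eq,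
    PySem.Chars.startswith_iff]
  exact pvSplit1_prefix_iff _ _
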